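-- pv_equiv track=rewrite | github.com/ericbgarnick/AOC | 2019/day10/day10.py | _laser_asteroids
-- ===== SOURCE A (Python) =====
-- from typing import Tuple, Set, List
--
-- Point = Tuple[int, int]
--
-- def _laser_asteroids(asteroid_radii: List[List[Point]], num_shots: int) -> List[Point]:
--     cur_radius_idx = -1
--     shot_asteroids = []
--     while len(shot_asteroids) < num_shots and len(asteroid_radii):
--         cur_radius_idx = (cur_radius_idx + 1) % len(asteroid_radii)
--         try:
--             cur_radius = asteroid_radii[cur_radius_idx]
--         except IndexError as e:
--             raise e
--         shot_asteroids.append(cur_radius[0])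
--         if len(cur_radius) == 1:
--             # drop current radius and decrement idx
--             asteroid_radii = (asteroid_radii[:cur_radius_idx] +
--                               asteroid_radii[cur_radius_idx + 1:])
--             cur_radius_idx -= 1
--         else:
--             cur_radius = cur_radius[1:]
--             asteroid_radii[cur_radius_idx] = cur_radius
--     return shot_asteroids
-- ===== SOURCE B (Python) =====
-- from typing import Tuple, List
--
-- Point = Tuple[int, int]
--
-- def _laser_asteroids(asteroid_radii: List[List[Point]], num_shots: int) -> List[Point]:
--     # Column-major pass over the angle groups: round-robin order without any
--     # slicing, index wrapping or group removal.
--     shot_asteroids = []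
--     max_len = max((len(radius) for radius in asteroid_radii), default=0)
--     for k in range(max_len):
--         for radius in asteroid_radii:
--             if len(shot_asteroids) >= num_shots:
--                 return shot_asteroids
--             if k < len(radius):
--                 shot_asteroids.append(radius[k])
--     return shot_asteroids
-- ===== Notes on version B (the rewrite author's own statement) =====
-- stated objective: alternative
-- what changed: Replaced A's stateful round-robin loop (index arithmetic mod a shrinking list, slicing out exhausted groups, in-place tail reassignment) by a column-major double loop: for each column k take the k-th element of every group that still has one, stopping once num_shots asteroids are collected; Pre_ excludes exactly the inputs where A raises IndexError (an empty angle group at an index below num_shots), on which B just skips the empty group.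
import Mathlib
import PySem

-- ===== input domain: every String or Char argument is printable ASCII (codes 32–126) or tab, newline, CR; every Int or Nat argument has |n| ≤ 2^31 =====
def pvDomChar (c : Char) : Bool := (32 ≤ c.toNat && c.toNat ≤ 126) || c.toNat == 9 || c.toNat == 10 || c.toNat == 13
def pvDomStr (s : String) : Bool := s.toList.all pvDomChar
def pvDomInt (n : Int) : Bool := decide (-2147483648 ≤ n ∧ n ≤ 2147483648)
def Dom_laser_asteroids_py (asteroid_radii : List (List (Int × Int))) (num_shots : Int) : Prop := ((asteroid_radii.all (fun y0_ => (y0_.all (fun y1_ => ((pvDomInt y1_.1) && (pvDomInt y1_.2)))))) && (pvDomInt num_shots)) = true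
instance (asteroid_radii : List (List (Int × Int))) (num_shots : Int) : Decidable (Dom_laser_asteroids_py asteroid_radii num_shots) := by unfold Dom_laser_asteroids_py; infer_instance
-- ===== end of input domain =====

-- B replaces A's stateful round-robin (index mod a shrinking list, slicing out exhausted groups,
-- in-place tail reassignment) by a column-major double loop over the unchanged groups; equivalence
-- is about the RETURN value only (A mutates its argument list in place, B does not).

-- ===== PORT A =====

-- total number of asteroids left: the termination measure of A's while loop
def pvSumLens (radii : List (List (Int × Int))) : Nat := (radii.map List.length).sum

-- literal port of A's while loop; state = (cur_radius_idx, shot_asteroids, asteroid_radii).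
-- The loop shoots exactly one asteroid per iteration, so a fuel of (total number of
-- asteroids)+1 is never exhausted: the fuel argument only makes the recursion structural.
def pvALoop : Nat → Int → Int → List (Int × Int) → List (List (Int × Int)) → List (Int × Int)
  | 0, _, _, shot, _ => shot   -- unreachable with the fuel laser_asteroids_py supplies
  | (fuel + 1), num_shots, idx, shot, radii =>
    if h : (shot.length : Int) < num_shots ∧ radii.length ≠ 0 then
      match PySem.List.pyGet? radii (PySem.Int.mod (idx + 1) (radii.length : Int)) with
      | none => shot   -- unreachable: the index was reduced mod len(asteroid_radii) > 0
      | some cur =>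
        match PySem.List.pyGet? cur 0 with
        | none => shot -- Python raises IndexError (cur_radius[0] on an empty group); outside Pre_
        | some p =>
          if hone : cur.length = 1 then
            pvALoop fuel num_shots (PySem.Int.mod (idx + 1) (radii.length : Int) - 1) (shot ++ [p])
              (PySem.List.slice radii none (some (PySem.Int.mod (idx + 1) (radii.length : Int))) ++
               PySem.List.slice radii (some (PySem.Int.mod (idx + 1) (radii.length : Int) + 1)) none)
          else
            pvALoop fuel num_shots (PySem.Int.mod (idx + 1) (radii.length : Int)) (shot ++ [p])
              (PySem.List.pySetD radii (PySem.Int.mod (idx + 1) (radii.length : Int))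
                (PySem.List.slice cur (some 1) none))
    else shot

def laser_asteroids_py (asteroid_radii : List (List (Int × Int))) (num_shots : Int) :
    List (Int × Int) :=
  pvALoop (pvSumLens asteroid_radii + 1) num_shots (-1) [] asteroid_radii

-- ===== PORT B =====

-- inner 'for radius in asteroid_radii' loop; Sum.inl = early 'return shot_asteroids'
def pvBInner (num_shots : Int) (k : Nat) (shot : List (Int × Int))
    (gs : List (List (Int × Int))) : (List (Int × Int)) ⊕ (List (Int × Int)) :=
  match gs with
  | [] => Sum.inr shot
  | g :: tl =>
    if num_shots ≤ (shot.length : Int) then Sum.inl shot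
    else if h : k < g.length then pvBInner num_shots k (shot ++ [g[k]]) tl
    else pvBInner num_shots k shot tl

-- outer 'for k in range(max_len)' loop
def pvBOuter (num_shots : Int) (radii : List (List (Int × Int))) (ks : List Nat)
    (shot : List (Int × Int)) : List (Int × Int) :=
  match ks with
  | [] => shot
  | k :: tl =>
    match pvBInner num_shots k shot radii with
    | Sum.inl s => s
    | Sum.inr s => pvBOuter num_shots radii tl s

def laser_asteroids_py_alt (asteroid_radii : List (List (Int × Int))) (num_shots : Int) :
    List (Int × Int) :=
  -- max((len(radius) for radius in asteroid_radii), default=0)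
  let maxLen : Nat := (asteroid_radii.map List.length).foldl max 0
  pvBOuter num_shots asteroid_radii (List.range maxLen) []

-- ===== PRECONDITION & SPEC =====

-- Pre_ excludes exactly the inputs on which A raises IndexError: those with an empty
-- angle group at an index j < num_shots (A's first pass hits it with cur_radius[0]).
def Pre_laser_asteroids_py (asteroid_radii : List (List (Int × Int))) (num_shots : Int) : Prop :=
  ∀ j : Nat, ∀ _ : j < asteroid_radii.length,
    asteroid_radii[j] = [] → num_shots ≤ (j : Int)

instance (asteroid_radii : List (List (Int × Int))) (num_shots : Int) :
    Decidable (Pre_laser_asteroids_py asteroid_radii num_shots) := by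
  unfold Pre_laser_asteroids_py; infer_instance

def pvWitness_laser_asteroids_py : (List (List (Int × Int))) × Int :=
  ([[(1, 2), (3, 4)], [(5, 6)]], 3)

def Spec_laser_asteroids_py (asteroid_radii : List (List (Int × Int))) (num_shots : Int)
    (out : List (Int × Int)) : Prop :=
  out = laser_asteroids_py_alt asteroid_radii num_shots

instance (asteroid_radii : List (List (Int × Int))) (num_shots : Int) (out : List (Int × Int)) :
    Decidable (Spec_laser_asteroids_py asteroid_radii num_shots out) := by
  unfold Spec_laser_asteroids_py; infer_instance

-- ===== CLAIM (what is proved, stated in full; the proofs are below) =====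
def Claim_equal_laser_asteroids_py : Prop := ∀ (asteroid_radii : List (List (Int × Int))) (num_shots : Int), Dom_laser_asteroids_py asteroid_radii num_shots → Pre_laser_asteroids_py asteroid_radii num_shots → Spec_laser_asteroids_py asteroid_radii num_shots (laser_asteroids_py asteroid_radii num_shots)


-- ===== LEMMAS AND PROOFS =====

lemma pvSumLens_append (a b : List (List (Int × Int))) :
    pvSumLens (a ++ b) = pvSumLens a + pvSumLens b := by
  simp [pvSumLens]

lemma pvSumLens_cons (g : List (Int × Int)) (gs : List (List (Int × Int))) :
    pvSumLens (g :: gs) = g.length + pvSumLens gs := by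
  simp [pvSumLens]

-- head of a nonempty group
def pvHd (g : List (Int × Int)) : Int × Int := g.headD (0, 0)

-- groups advanced one step: exhausted groups removed, others lose their head
def pvAdv (gs : List (List (Int × Int))) : List (List (Int × Int)) :=
  gs.filterMap (fun g => if g.length ≤ 1 then none else some g.tail)

-- column k: the k-th element of every group that has one, in group order
def pvColOf (k : Nat) (gs : List (List (Int × Int))) : List (Int × Int) :=
  gs.filterMap (fun g => g[k]?)

def pvMaxH (gs : List (List (Int × Int))) : Nat := (gs.map List.length).foldl max 0

-- the full column-major sequence; both programs return a prefix of it
def pvColFlat (gs : List (List (Int × Int))) : List (Int × Int) :=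
  ((List.range (pvMaxH gs)).map (fun k => pvColOf k gs)).flatten

lemma pvMaxH_cons (g : List (Int × Int)) (tl : List (List (Int × Int))) :
    pvMaxH (g :: tl) = max g.length (pvMaxH tl) := by
  simp only [pvMaxH, List.map_cons, List.foldl_cons]
  rw [Nat.max_comm 0 g.length]
  exact List.foldl_assoc

lemma pvAdv_cons (g : List (Int × Int)) (tl : List (List (Int × Int))) :
    pvAdv (g :: tl) = if g.length ≤ 1 then pvAdv tl else g.tail :: pvAdv tl := by
  by_cases hg : g.length ≤ 1 <;> simp [pvAdv, hg]

lemma pvColOf_append (k : Nat) (a b : List (List (Int × Int))) :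
    pvColOf k (a ++ b) = pvColOf k a ++ pvColOf k b := by
  simp [pvColOf, List.filterMap_append]

lemma pvColOf_zero (gs : List (List (Int × Int))) (h : ∀ g ∈ gs, g ≠ []) :
    pvColOf 0 gs = gs.map pvHd := by
  induction gs with
  | nil => rfl
  | cons g tl IH =>
    cases g with
    | nil => exact absurd rfl (h _ (by simp))
    | cons a t =>
      simp [pvColOf, pvHd]
      exact IH (fun g hg => h g (by simp [hg]))

lemma pvColOf_succ (k : Nat) (gs : List (List (Int × Int))) (h : ∀ g ∈ gs, g ≠ []) :
    pvColOf (k+1) gs = pvColOf k (pvAdv gs) := by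
  induction gs with
  | nil => rfl
  | cons g tl IH =>
    have IH' := IH (fun g hg => h g (by simp [hg]))
    cases g with
    | nil => exact absurd rfl (h _ (by simp))
    | cons a t =>
      rw [pvAdv_cons]
      by_cases ht : t = []
      · subst ht
        rw [if_pos (by simp)]
        rw [show pvColOf (k+1) ([a] :: tl) = pvColOf (k+1) tl from by
          simp [pvColOf, List.filterMap_cons]]
        exact IH'
      · have h1 : ¬ ((a :: t).length ≤ 1) := by
          cases t with | nil => exact absurd rfl ht | cons b u => simp
        rw [if_neg h1]
        simp only [List.tail_cons]
        cases htk : t[k]? with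
        | none =>
          rw [show pvColOf (k+1) ((a :: t) :: tl) = pvColOf (k+1) tl from by
            simp [pvColOf, List.filterMap_cons, htk]]
          rw [show pvColOf k (t :: pvAdv tl) = pvColOf k (pvAdv tl) from by
            simp [pvColOf, List.filterMap_cons, htk]]
          exact IH'
        | some v =>
          rw [show pvColOf (k+1) ((a :: t) :: tl) = v :: pvColOf (k+1) tl from by
            simp [pvColOf, List.filterMap_cons, htk]]
          rw [show pvColOf k (t :: pvAdv tl) = v :: pvColOf k (pvAdv tl) from by
            simp [pvColOf, List.filterMap_cons, htk]]
          rw [IH']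

lemma pvMaxH_adv (gs : List (List (Int × Int))) (h : ∀ g ∈ gs, g ≠ []) :
    pvMaxH (pvAdv gs) = pvMaxH gs - 1 := by
  induction gs with
  | nil => rfl
  | cons g tl IH =>
    have IH' := IH (fun g hg => h g (by simp [hg]))
    have hg : g ≠ [] := h g (by simp)
    have hgl : 0 < g.length := by cases g with | nil => exact absurd rfl hg | cons a t => simp
    rw [pvAdv_cons, pvMaxH_cons]
    by_cases h1 : g.length ≤ 1
    · rw [if_pos h1, IH']; omega
    · rw [if_neg h1, pvMaxH_cons, IH', List.length_tail]; omega

lemma pvColFlat_step (gs : List (List (Int × Int))) (h : ∀ g ∈ gs, g ≠ []) :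
    pvColFlat gs = gs.map pvHd ++ pvColFlat (pvAdv gs) := by
  cases hgs : gs with
  | nil => rfl
  | cons g tl =>
    subst hgs
    have hg : g ≠ [] := h g (by simp)
    have hgl : 0 < g.length := by cases g with | nil => exact absurd rfl hg | cons a t => simp
    have hpos : 0 < pvMaxH (g :: tl) := by rw [pvMaxH_cons]; omega
    obtain ⟨m, hm⟩ : ∃ m, pvMaxH (g :: tl) = m + 1 := ⟨pvMaxH (g :: tl) - 1, by omega⟩
    have hadv : pvMaxH (pvAdv (g :: tl)) = m := by rw [pvMaxH_adv _ h, hm]; omega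
    rw [pvColFlat, hm, List.range_succ_eq_map]
    simp only [List.map_cons, List.flatten_cons, List.map_map]
    rw [pvColOf_zero _ h]
    congr 1
    rw [pvColFlat, hadv]
    congr 1
    apply List.map_congr_left
    intro k _
    exact pvColOf_succ k _ h

-- ----- B = take n' of the column-major sequence -----

lemma pvBInner_spec (n : Int) (k : Nat) (gs : List (List (Int × Int))) : ∀ shot,
    shot.length ≤ n.toNat →
    (∀ s, pvBInner n k shot gs = Sum.inl s →
      s = shot ++ (pvColOf k gs).take (n.toNat - shot.length) ∧ s.length = n.toNat) ∧
    (∀ s, pvBInner n k shot gs = Sum.inr s →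
      s = shot ++ (pvColOf k gs).take (n.toNat - shot.length) ∧ s.length ≤ n.toNat ∧
      (s.length < n.toNat → s = shot ++ pvColOf k gs)) := by
  induction gs with
  | nil =>
    intro shot hs
    constructor
    · intro s h; simp [pvBInner] at h
    · intro s h
      simp only [pvBInner, Sum.inr.injEq] at h
      subst h
      exact ⟨by simp [pvColOf], hs, fun _ => by simp [pvColOf]⟩
  | cons g tl IH =>
    intro shot hs
    by_cases hstop : n ≤ (shot.length : Int)
    · have hlen : shot.length = n.toNat := by omega
      constructor
      · intro s h
        simp only [pvBInner, if_pos hstop, Sum.inl.injEq] at h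
        subst h
        exact ⟨by simp [hlen], hlen⟩
      · intro s h
        simp [pvBInner, if_pos hstop] at h
    · have hlt : shot.length < n.toNat := by omega
      by_cases hk : k < g.length
      · have hcol : pvColOf k (g :: tl) = g[k] :: pvColOf k tl := by
          simp [pvColOf, List.filterMap_cons, List.getElem?_eq_getElem hk]
        have hstep : pvBInner n k shot (g :: tl) = pvBInner n k (shot ++ [g[k]]) tl := by
          simp only [pvBInner]; rw [if_neg hstop, dif_pos hk]
        have hs' : (shot ++ [g[k]]).length ≤ n.toNat := by simp; omega
        obtain ⟨IH1, IH2⟩ := IH (shot ++ [g[k]]) hs'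
        constructor
        · intro s h
          rw [hstep] at h
          obtain ⟨e, hl⟩ := IH1 s h
          refine ⟨?_, hl⟩
          rw [e, hcol, show n.toNat - shot.length = (n.toNat - (shot ++ [g[k]]).length) + 1 by
            simp; omega, List.take_succ_cons]
          simp
        · intro s h
          rw [hstep] at h
          obtain ⟨e, hle, hfull⟩ := IH2 s h
          refine ⟨?_, hle, ?_⟩
          · rw [e, hcol, show n.toNat - shot.length = (n.toNat - (shot ++ [g[k]]).length) + 1 by
              simp; omega, List.take_succ_cons]
            simp
          · intro hslt
            rw [hfull hslt, hcol]
            simp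
      · have hcol : pvColOf k (g :: tl) = pvColOf k tl := by
          simp [pvColOf, List.filterMap_cons, List.getElem?_eq_none (by omega : g.length ≤ k)]
        have hstep : pvBInner n k shot (g :: tl) = pvBInner n k shot tl := by
          simp only [pvBInner]; rw [if_neg hstop, dif_neg hk]
        obtain ⟨IH1, IH2⟩ := IH shot hs
        constructor
        · intro s h; rw [hstep] at h; rw [hcol]; exact IH1 s h
        · intro s h; rw [hstep] at h; rw [hcol]; exact IH2 s h

lemma pvBOuter_spec (n : Int) (radii : List (List (Int × Int))) : ∀ (ks : List Nat) shot,
    shot.length ≤ n.toNat →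
    pvBOuter n radii ks shot
      = shot ++ ((ks.map (fun k => pvColOf k radii)).flatten).take (n.toNat - shot.length) := by
  intro ks
  induction ks with
  | nil => intro shot hs; simp [pvBOuter]
  | cons k tl IH =>
    intro shot hs
    cases hB : pvBInner n k shot radii with
    | inl s =>
      have hred : pvBOuter n radii (k :: tl) shot = s := by simp only [pvBOuter, hB]
      rw [hred]
      obtain ⟨he, hl⟩ := (pvBInner_spec n k radii shot hs).1 s hB
      rw [List.map_cons, List.flatten_cons]
      have hlen_take : (n.toNat - shot.length) ≤ (pvColOf k radii).length := by
        have hsl : s.length = shot.length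
            + ((pvColOf k radii).take (n.toNat - shot.length)).length := by rw [he]; simp
        simp [List.length_take] at hsl
        omega
      rw [List.take_append_of_le_length hlen_take]
      exact he
    | inr s =>
      have hred : pvBOuter n radii (k :: tl) shot = pvBOuter n radii tl s := by
        simp only [pvBOuter, hB]
      rw [hred]
      obtain ⟨he, hle, hfull⟩ := (pvBInner_spec n k radii shot hs).2 s hB
      rw [IH s hle, List.map_cons, List.flatten_cons]
      by_cases hslt : s.length < n.toNat
      · have hfe := hfull hslt
        have hsl : s.length = shot.length + (pvColOf k radii).length := by rw [hfe]; simp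
        have hcl : (pvColOf k radii).length ≤ n.toNat - shot.length := by omega
        rw [hfe]
        first
        | rw [List.take_append_eq_append_take]
        | rw [List.take_append]
        first
        | rw [List.take_of_length_le hcl]
        | rw [List.take_all_of_le hcl]
        rw [show n.toNat - shot.length - (pvColOf k radii).length = n.toNat - s.length by omega]
        simp
        omega
      · have hsl : s.length = n.toNat := by omega
        rw [show n.toNat - s.length = 0 by omega]
        simp only [List.take_zero, List.append_nil]
        have htl : ((pvColOf k radii).take (n.toNat - shot.length)).length
            = n.toNat - shot.length := by
          have : s.length = shot.length
              + ((pvColOf k radii).take (n.toNat - shot.length)).length := by rw [he]; simp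
          omega
        have hlen_take : n.toNat - shot.length ≤ (pvColOf k radii).length := by
          simp [List.length_take] at htl; omega
        rw [List.take_append_of_le_length hlen_take]
        exact he

lemma pvB_eq (radii : List (List (Int × Int))) (n : Int) :
    laser_asteroids_py_alt radii n = (pvColFlat radii).take n.toNat := by
  show pvBOuter n radii (List.range ((radii.map List.length).foldl max 0)) [] = _
  rw [pvBOuter_spec n radii _ [] (by simp)]
  simp [pvColFlat, pvMaxH]

-- ----- A: one step of the loop, and the loop invariants -----

lemma pvAWrap (fuel : Nat) (n : Int) (shot : List (Int × Int)) (radii : List (List (Int × Int)))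
    (h : radii ≠ []) :
    pvALoop fuel n ((radii.length : Int) - 1) shot radii = pvALoop fuel n (-1) shot radii := by
  cases fuel with
  | zero => rfl
  | succ f =>
    have hne : radii.length ≠ 0 := fun hc => h (List.eq_nil_of_length_eq_zero hc)
    have hL : (0:Int) < (radii.length : Int) := by exact_mod_cast Nat.pos_of_ne_zero hne
    have h1 : PySem.Int.mod (((radii.length : Int) - 1) + 1) (radii.length : Int)
        = PySem.Int.mod ((-1) + 1) (radii.length : Int) := by
      rw [PySem.Int.mod_eq_emod_of_pos hL, PySem.Int.mod_eq_emod_of_pos hL]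
      rw [show ((radii.length : Int) - 1) + 1 = (radii.length : Int) by ring]
      simp [Int.emod_self]
    rw [pvALoop, pvALoop]
    first | rw [h1] | simp only [h1]

lemma pvAStep (n : Int) (f : Nat) (done ts : List (List (Int × Int))) (shot : List (Int × Int))
    (p : Int × Int) (rest : List (Int × Int)) (hlt : (shot.length : Int) < n) :
    pvALoop (f + 1) n ((done.length : Int) - 1) shot (done ++ (p :: rest) :: ts) =
      if rest = [] then pvALoop f n ((done.length : Int) - 1) (shot ++ [p]) (done ++ ts)
      else pvALoop f n (((done ++ [rest]).length : Int) - 1) (shot ++ [p])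
            ((done ++ [rest]) ++ ts) := by
  have hlen0 : (done ++ (p :: rest) :: ts).length ≠ 0 := by simp
  have hLpos : (0:Int) < ((done ++ (p :: rest) :: ts).length : Int) := by
    exact_mod_cast Nat.pos_of_ne_zero hlen0
  have hi : PySem.Int.mod (((done.length : Int) - 1) + 1)
      ((done ++ (p :: rest) :: ts).length : Int) = (done.length : Int) := by
    rw [show ((done.length : Int) - 1) + 1 = (done.length : Int) by ring]
    rw [PySem.Int.mod_eq_emod_of_pos hLpos]
    refine Int.emod_eq_of_lt (by positivity) ?_
    have hlt' : done.length < (done ++ (p :: rest) :: ts).length := by simp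
    exact_mod_cast hlt'
  have hval : PySem.List.pyGet? (done ++ (p :: rest) :: ts)
      (PySem.Int.mod (((done.length : Int) - 1) + 1)
        ((done ++ (p :: rest) :: ts).length : Int)) = some (p :: rest) := by
    rw [hi]
    simp [pysem, List.getElem?_append_right]
  have hval2 : PySem.List.pyGet? (p :: rest) 0 = some p := by simp [pysem]
  rw [pvALoop, dif_pos ⟨hlt, hlen0⟩]
  split
  · next heq => rw [hval] at heq; simp at heq
  · next cur heq =>
    rw [hval] at heq
    obtain rfl : p :: rest = cur := by injection heq
    split
    · next heq2 => rw [hval2] at heq2; simp at heq2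
    · next q heq2 =>
      rw [hval2] at heq2
      obtain rfl : p = q := by injection heq2
      by_cases hr : rest = []
      · subst hr
        rw [if_pos rfl, dif_pos (show (p :: ([] : List (Int × Int))).length = 1 by simp)]
        rw [hi]
        have hs1 : PySem.List.slice (done ++ (p :: ([] : List (Int × Int))) :: ts) none
            (some ((done.length : Int))) = done := by
          rw [PySem.List.slice_to_natCast]; simp
        have hs2 : PySem.List.slice (done ++ (p :: ([] : List (Int × Int))) :: ts)
            (some ((done.length : Int) + 1)) none = ts := by
          rw [show ((done.length : Int) + 1) = (((done.length + 1 : Nat)) : Int) by push_cast; ring]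
          rw [PySem.List.slice_from_natCast, List.append_cons]
          exact List.drop_left' (by simp)
        rw [hs1, hs2]
      · rw [if_neg hr]
        have hne1 : ¬ ((p :: rest).length = 1) := by
          cases rest with | nil => exact absurd rfl hr | cons b u => simp
        rw [dif_neg hne1, hi]
        have hset : PySem.List.pySetD (done ++ (p :: rest) :: ts) ((done.length : Int))
            (PySem.List.slice (p :: rest) (some 1) none) = (done ++ [rest]) ++ ts := by
          rw [PySem.List.slice_from_one]
          simp
        rw [hset, show (((done ++ [rest]).length : Int) - 1) = ((done.length : Int)) by simp]

lemma pvAdv_nil : pvAdv [] = [] := rfl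

lemma pvAPass (n : Int) : ∀ N (fuel : Nat) (done todo : List (List (Int × Int))) shot,
    2 * pvSumLens (done ++ todo) + done.length ≤ N →
    pvSumLens (done ++ todo) < fuel →
    (∀ g ∈ done ++ todo, g ≠ []) →
    pvALoop fuel n ((done.length : Int) - 1) shot (done ++ todo) =
      shot ++ (todo.map pvHd ++ pvColFlat (done ++ pvAdv todo)).take (n.toNat - shot.length) := by
  intro N
  induction N using Nat.strong_induction_on with
  | _ N IH =>
  intro fuel done todo shot hN hf hne
  cases fuel with
  | zero => exact absurd hf (by omega)
  | succ f =>
  by_cases hc : (shot.length : Int) < n ∧ (done ++ todo).length ≠ 0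
  · cases todo with
    | nil =>
      have hdone : done ≠ [] := by
        intro h0; rw [h0] at hc; simp at hc
      have hdl : 0 < done.length := by
        cases done with | nil => exact absurd rfl hdone | cons _ _ => simp
      simp only [List.append_nil, pvAdv_nil, List.map_nil, List.nil_append]
      rw [pvAWrap (f + 1) n shot done hdone]
      have hm : 2 * pvSumLens done < N := by
        rw [List.append_nil] at hN; omega
      have hIH := IH (2 * pvSumLens done) hm (f + 1) [] done shot (by simp)
        (by simpa using hf) (fun g hg => hne g (by simpa using hg))
      simp only [List.length_nil, Nat.cast_zero, List.nil_append, zero_sub] at hIH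
      rw [hIH, ← pvColFlat_step done (fun g hg => hne g (by simpa using hg))]
    | cons g ts =>
      have hgne : g ≠ [] := hne g (by simp)
      obtain ⟨p, rest, rfl⟩ : ∃ p rest, g = p :: rest := by
        cases g with | nil => exact absurd rfl hgne | cons a t => exact ⟨a, t, rfl⟩
      rw [pvAStep n f done ts shot p rest hc.1]
      have hpos : 0 < n.toNat - shot.length := by
        have := hc.1; omega
      by_cases hr : rest = []
      · subst hr
        rw [if_pos rfl]
        have hsum : pvSumLens (done ++ (p :: ([] : List (Int × Int))) :: ts)
            = pvSumLens (done ++ ts) + 1 := by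
          rw [pvSumLens_append, pvSumLens_cons, pvSumLens_append]; simp; omega
        have hm : 2 * pvSumLens (done ++ ts) + done.length < N := by omega
        have hne' : ∀ g ∈ done ++ ts, g ≠ [] := by
          intro g hg
          apply hne
          simp only [List.mem_append] at hg ⊢
          rcases hg with h | h
          · exact Or.inl h
          · exact Or.inr (by simp [h])
        rw [IH (2 * pvSumLens (done ++ ts) + done.length) hm f done ts (shot ++ [p]) le_rfl
          (by omega) hne']
        rw [show pvAdv ((p :: ([] : List (Int × Int))) :: ts) = pvAdv ts from by
          rw [pvAdv_cons, if_pos (by simp)]]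
        simp only [List.map_cons, List.cons_append]
        rw [show n.toNat - shot.length = (n.toNat - (shot ++ [p]).length) + 1 by simp; omega]
        rw [List.take_succ_cons]
        simp [pvHd]
      · rw [if_neg hr]
        have hsum : pvSumLens (done ++ (p :: rest) :: ts)
            = pvSumLens ((done ++ [rest]) ++ ts) + 1 := by
          rw [pvSumLens_append, pvSumLens_cons, pvSumLens_append, pvSumLens_append,
            pvSumLens_cons]
          simp [pvSumLens]
          omega
        have hm : 2 * pvSumLens ((done ++ [rest]) ++ ts) + (done ++ [rest]).length < N := by
          simp only [List.length_append, List.length_cons, List.length_nil] at *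
          omega
        have hne' : ∀ g ∈ (done ++ [rest]) ++ ts, g ≠ [] := by
          intro g hg
          simp only [List.mem_append, List.mem_singleton] at hg
          rcases hg with (h | h) | h
          · exact hne g (by simp [h])
          · rw [h]; exact hr
          · exact hne g (by simp [h])
        rw [IH (2 * pvSumLens ((done ++ [rest]) ++ ts) + (done ++ [rest]).length) hm
          f (done ++ [rest]) ts (shot ++ [p]) le_rfl (by omega) hne']
        rw [show pvAdv ((p :: rest) :: ts) = rest :: pvAdv ts from by
          rw [pvAdv_cons, if_neg (by cases rest with
            | nil => exact absurd rfl hr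
            | cons b u => simp)]
          simp]
        rw [show done ++ rest :: pvAdv ts = (done ++ [rest]) ++ pvAdv ts from
          List.append_cons _ _ _]
        simp only [List.map_cons, List.cons_append]
        rw [show n.toNat - shot.length = (n.toNat - (shot ++ [p]).length) + 1 by simp; omega]
        rw [List.take_succ_cons]
        simp [pvHd]
  · rw [pvALoop, dif_neg hc]
    rcases Decidable.not_and_iff_or_not.mp hc with h | h
    · rw [show n.toNat - shot.length = 0 by omega]
      simp
    · have hlen : (done ++ todo).length = 0 := by omega
      have hnil : done ++ todo = [] := by
        cases hdt : done ++ todo with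
        | nil => rfl
        | cons x xs => rw [hdt] at hlen; simp at hlen
      obtain ⟨hd, ht⟩ := List.append_eq_nil_iff.mp hnil
      subst hd; subst ht
      simp [pvColFlat, pvMaxH, pvAdv]

lemma pvAFirst (n : Int) : ∀ (todo done : List (List (Int × Int))) shot (fuel : Nat),
    (∀ g ∈ todo.take (n.toNat - shot.length), g ≠ []) →
    n.toNat - shot.length ≤ todo.length →
    pvSumLens (done ++ todo) < fuel →
    pvALoop fuel n ((done.length : Int) - 1) shot (done ++ todo) =
      shot ++ (todo.take (n.toNat - shot.length)).map pvHd := by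
  intro todo
  induction todo with
  | nil =>
    intro done shot fuel h1 h2 hf
    cases fuel with
    | zero => exact absurd hf (by omega)
    | succ f =>
    simp only [List.length_nil] at h2
    have h0 : n.toNat - shot.length = 0 := by omega
    rw [pvALoop, dif_neg (by rintro ⟨hlt, -⟩; omega)]
    rw [h0]
    simp
  | cons g ts IH =>
    intro done shot fuel h1 h2 hf
    cases fuel with
    | zero => exact absurd hf (by omega)
    | succ f =>
    by_cases hstop : (shot.length : Int) < n
    · have hpos : 0 < n.toNat - shot.length := by omega
      have htake : (g :: ts).take (n.toNat - shot.length)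
          = g :: ts.take (n.toNat - shot.length - 1) := by
        conv_lhs => rw [show n.toNat - shot.length = (n.toNat - shot.length - 1) + 1 by omega]
        rw [List.take_succ_cons]
      have hgne : g ≠ [] := by
        apply h1; rw [htake]; simp
      obtain ⟨p, rest, rfl⟩ : ∃ p rest, g = p :: rest := by
        cases g with | nil => exact absurd rfl hgne | cons a t => exact ⟨a, t, rfl⟩
      rw [pvAStep n f done ts shot p rest hstop]
      have hlen1 : n.toNat - (shot ++ [p]).length = n.toNat - shot.length - 1 := by simp; omega
      have hh1 : ∀ g' ∈ ts.take (n.toNat - (shot ++ [p]).length), g' ≠ [] := by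
        intro g' hg'
        apply h1
        rw [htake, hlen1] at *
        simp at hg' ⊢
        exact Or.inr hg'
      have hh2 : n.toNat - (shot ++ [p]).length ≤ ts.length := by
        simp only [List.length_cons] at h2
        rw [hlen1]; omega
      by_cases hr : rest = []
      · subst hr
        have hsum : pvSumLens (done ++ (p :: ([] : List (Int × Int))) :: ts)
            = pvSumLens (done ++ ts) + 1 := by
          rw [pvSumLens_append, pvSumLens_cons, pvSumLens_append]; simp; omega
        rw [if_pos rfl, IH done (shot ++ [p]) f hh1 hh2 (by omega)]
        rw [htake, hlen1]
        simp [pvHd]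
      · have hsum : pvSumLens (done ++ (p :: rest) :: ts)
            = pvSumLens ((done ++ [rest]) ++ ts) + 1 := by
          rw [pvSumLens_append, pvSumLens_cons, pvSumLens_append, pvSumLens_append,
            pvSumLens_cons]
          simp [pvSumLens]
          omega
        rw [if_neg hr, IH (done ++ [rest]) (shot ++ [p]) f hh1 hh2 (by omega)]
        rw [htake, hlen1]
        simp [pvHd]
    · have h0 : n.toNat - shot.length = 0 := by omega
      rw [pvALoop, dif_neg (fun hcc => hstop hcc.1)]
      rw [h0]
      simp

lemma pvColFlatTake (radii : List (List (Int × Int))) (n' : Nat)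
    (h1 : ∀ g ∈ radii.take n', g ≠ []) (h2 : n' ≤ radii.length) :
    (pvColFlat radii).take n' = (radii.take n').map pvHd := by
  cases hn : n' with
  | zero => simp
  | succ m =>
    subst hn
    cases radii with
    | nil => simp at h2
    | cons g tl =>
      have hg : g ≠ [] := h1 g (by rw [List.take_succ_cons]; simp)
      have hgl : 0 < g.length := by cases g with | nil => exact absurd rfl hg | cons a t => simp
      have hpos : 0 < pvMaxH (g :: tl) := by rw [pvMaxH_cons]; omega
      obtain ⟨mh, hmh⟩ : ∃ mh, pvMaxH (g :: tl) = mh + 1 := ⟨pvMaxH (g :: tl) - 1, by omega⟩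
      rw [pvColFlat, hmh, List.range_succ_eq_map]
      simp only [List.map_cons, List.flatten_cons]
      have hsplit : pvColOf 0 (g :: tl)
          = (((g :: tl).take (m+1)).map pvHd) ++ pvColOf 0 ((g :: tl).drop (m+1)) := by
        conv_lhs => rw [← List.take_append_drop (m+1) (g :: tl)]
        rw [pvColOf_append, pvColOf_zero _ h1]
      rw [hsplit, List.append_assoc]
      have hlen : ((((g :: tl).take (m+1)).map pvHd)).length = m + 1 := by
        simp only [List.length_map, List.length_take]
        simp only [List.length_cons] at h2 ⊢
        omega
      rw [List.take_left' hlen]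

-- ===== VERDICT (by name: the statement is the Claim_ definition above) =====
theorem laser_asteroids_py_spec : Claim_equal_laser_asteroids_py := by
  intro radii n _ hPre
  unfold Spec_laser_asteroids_py
  rw [pvB_eq]
  have hstart : laser_asteroids_py radii n
      = pvALoop (pvSumLens radii + 1) n ((([] : List (List (Int × Int))).length : Int) - 1) []
          ([] ++ radii) := by
    show pvALoop (pvSumLens radii + 1) n (-1) [] radii = _
    norm_num
  by_cases hall : ∀ g ∈ radii, g ≠ []
  · rw [hstart, pvAPass n (2 * pvSumLens ([] ++ radii)) (pvSumLens radii + 1) [] radii []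
      (by simp) (by rw [List.nil_append]; omega) (by simpa using hall)]
    rw [pvColFlat_step radii hall]
    simp
  · push_neg at hall
    obtain ⟨g0, hg0mem, hg0⟩ := hall
    obtain ⟨j, hj, hgj⟩ := List.mem_iff_getElem.mp hg0mem
    have hnj : n ≤ (j : Int) := hPre j hj (by rw [hgj, hg0])
    have h2 : n.toNat ≤ radii.length := by omega
    have h1 : ∀ g ∈ radii.take n.toNat, g ≠ [] := by
      intro g hg hgnil
      obtain ⟨i, hi, hgi⟩ := List.mem_iff_getElem.mp hg
      have hi' : i < n.toNat := by simp [List.length_take] at hi; omega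
      have hii : i < radii.length := by omega
      have hri : radii[i] = g := by
        rw [← hgi]; simp [List.getElem_take]
      have := hPre i hii (by rw [hri, hgnil])
      omega
    rw [hstart, pvAFirst n radii [] [] (pvSumLens radii + 1) (by simpa using h1)
      (by simpa using h2) (by rw [List.nil_append]; omega)]
    rw [pvColFlatTake radii n.toNat h1 h2]
    simp
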